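-- pv_equiv track=rewrite | github.com/ProstoJENbKa/Test | task1.py | circular_path
-- ===== SOURCE A (Python) =====
-- def circular_path(n, m):
--     arr = list(range(1, n + 1))
--     idx = 0
--     path = []
--
--     while True:
--         path.append(arr[idx])
--
--         for step in range(m - 1):
--             idx += 1
--             if idx == n:
--                 idx = 0
--
--         if idx == 0:
--             break
--
--     return ''.join(str(x) for x in path)
-- ===== SOURCE B (Python) =====
-- def circular_path(n, m):
--     # One jump of (m-1) positions is a single modular addition; walk the orbit
--     # of 0 under +s (mod n) directly instead of stepping one cell at a time.
--     s = (m - 1) % n if m > 1 else 0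
--     out = ["1"]
--     idx = s
--     while idx != 0:
--         out.append(str(idx + 1))
--         idx = (idx + s) % n
--     return ''.join(out)
-- ===== Notes on version B (the rewrite author's own statement) =====
-- stated objective: faster
-- what changed: The inner (m-1)-step unit-increment walk is replaced by a single modular addition idx=(idx+s)%n with s=(m-1)%n, and the arr lookup by the closed form idx+1, so each visited position costs O(1) instead of O(m).
import Mathlib
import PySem

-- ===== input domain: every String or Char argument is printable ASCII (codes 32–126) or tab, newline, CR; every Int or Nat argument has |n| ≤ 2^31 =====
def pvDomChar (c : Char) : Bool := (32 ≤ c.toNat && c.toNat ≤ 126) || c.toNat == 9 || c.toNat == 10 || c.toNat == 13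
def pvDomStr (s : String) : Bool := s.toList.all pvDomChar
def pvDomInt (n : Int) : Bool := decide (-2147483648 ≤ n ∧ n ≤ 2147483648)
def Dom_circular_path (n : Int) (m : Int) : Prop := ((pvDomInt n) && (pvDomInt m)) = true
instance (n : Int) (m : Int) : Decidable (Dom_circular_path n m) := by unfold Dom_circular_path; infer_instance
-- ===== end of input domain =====

-- B replaces A's inner one-cell-at-a-time stepping loop by a single modular jump
-- idx = (idx + s) % n and the arr[idx] lookup by the closed form idx + 1 (objective: faster).

-- ===== PORT A =====
-- 'idx += 1; if idx == n: idx = 0'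
def cpStep (n : Int) (idx : Int) : Int :=
  let idx := idx + 1
  if idx = n then 0 else idx

-- 'for step in range(m - 1): …'
def cpInner (n : Int) (m : Int) (idx : Int) : Int :=
  (PySem.List.pyRange 0 (m - 1) 1).foldl (fun idx _ => cpStep n idx) idx

-- the 'while True' loop; fuel n.toNat + 1 (A performs at most n appends; see the proofs);
-- pyGet? = none is Python's IndexError (n ≤ 0), excluded by Pre_
def cpLoopA (n : Int) (m : Int) (arr : List Int) : Nat → Int → List Int → List Int
  | 0, _, path => path
  | f+1, idx, path =>
    match PySem.List.pyGet? arr idx with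
    | none => path
    | some v =>
      let path := path ++ [v]
      let idx := cpInner n m idx
      if idx = 0 then path else cpLoopA n m arr f idx path

def circular_path (n : Int) (m : Int) : String :=
  let arr := PySem.List.pyRange 1 (n + 1) 1
  PySem.Str.join "" ((cpLoopA n m arr (n.toNat + 1) 0 []).map PySem.Int.toStr)

-- ===== PORT B =====
-- 'while idx != 0: out.append(str(idx + 1)); idx = (idx + s) % n'; fuel n.natAbs suffices
-- (the loop revisits 0 after at most |n| jumps)
def cpLoopB (n : Int) (s : Int) : Nat → Int → List String → List String
  | 0, _, out => out
  | f+1, idx, out =>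
    if idx = 0 then out
    else cpLoopB n s f (PySem.Int.mod (idx + s) n) (out ++ [PySem.Int.toStr (idx + 1)])

def circular_path_alt (n : Int) (m : Int) : String :=
  let s := if m > 1 then PySem.Int.mod (m - 1) n else 0
  PySem.Str.join "" (cpLoopB n s n.natAbs s ["1"])

-- ===== PRECONDITION & SPEC =====
-- A evaluates arr[idx] with arr = list(range(1, n+1)): for n ≤ 0 the list is empty and the very
-- first lookup raises IndexError, so Pre_ is exactly n ≥ 1.
def Pre_circular_path (n : Int) (m : Int) : Prop := 1 ≤ n
instance (n : Int) (m : Int) : Decidable (Pre_circular_path n m) := by unfold Pre_circular_path; infer_instance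
def pvWitness_circular_path : Int × Int := (5, 3)

def Spec_circular_path (n : Int) (m : Int) (out : String) : Prop := out = circular_path_alt n m
instance (n : Int) (m : Int) (out : String) : Decidable (Spec_circular_path n m out) := by unfold Spec_circular_path; infer_instance

-- ===== CLAIM (what is proved, stated in full; the proofs are below) =====
def Claim_equal_circular_path : Prop := ∀ (n : Int) (m : Int), Dom_circular_path n m → Pre_circular_path n m → Spec_circular_path n m (circular_path n m)

-- ===== LEMMAS AND PROOFS =====

-- A's one-cell step is +1 mod n
theorem cpStep_eq_mod (n idx : Int) (hn : 0 < n) (h0 : 0 ≤ idx) (h1 : idx < n) :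
    cpStep n idx = PySem.Int.mod (idx + 1) n := by
  rw [PySem.Int.mod_eq_emod_of_pos hn]
  unfold cpStep
  by_cases h : idx + 1 = n
  · simp [h]
  · simp only [h, if_false]
    rw [Int.emod_eq_of_lt (by omega) (by omega)]

-- folding A's step over any list of length L lands at (idx + L) mod n
theorem foldl_cpStep (n : Int) (hn : 0 < n) :
    ∀ (l : List Int) (idx : Int), 0 ≤ idx → idx < n →
      l.foldl (fun idx _ => cpStep n idx) idx = PySem.Int.mod (idx + l.length) n := by
  intro l
  induction l with
  | nil =>
    intro idx h0 h1
    simp [PySem.Int.mod_eq_emod_of_pos hn, Int.emod_eq_of_lt h0 h1]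
  | cons a t ih =>
    intro idx h0 h1
    have hstep := cpStep_eq_mod n idx hn h0 h1
    have hb0 : 0 ≤ cpStep n idx := by
      rw [hstep]; exact PySem.Int.mod_nonneg _ hn
    have hb1 : cpStep n idx < n := by
      rw [hstep]; exact PySem.Int.mod_lt _ hn
    simp only [List.foldl_cons]
    rw [ih (cpStep n idx) hb0 hb1, hstep]
    rw [PySem.Int.mod_eq_emod_of_pos hn, PySem.Int.mod_eq_emod_of_pos hn,
        PySem.Int.mod_eq_emod_of_pos hn]
    rw [Int.emod_add_emod]
    congr 1
    simp only [List.length_cons]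
    push_cast
    ring

-- the jump size both programs use
def cpS (n : Int) (m : Int) : Int := if m > 1 then PySem.Int.mod (m - 1) n else 0

theorem cpS_bounds (n m : Int) (hn : 0 < n) : 0 ≤ cpS n m ∧ cpS n m < n := by
  unfold cpS
  split_ifs
  · exact ⟨PySem.Int.mod_nonneg _ hn, PySem.Int.mod_lt _ hn⟩
  · exact ⟨le_refl 0, hn⟩

-- A's inner loop is one modular jump by cpS
theorem cpInner_eq (n m idx : Int) (hn : 0 < n) (h0 : 0 ≤ idx) (h1 : idx < n) :
    cpInner n m idx = PySem.Int.mod (idx + cpS n m) n := by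
  unfold cpInner cpS
  by_cases hm : m > 1
  · rw [foldl_cpStep n hn _ idx h0 h1]
    rw [PySem.List.length_pyRange_one]
    simp only [hm, if_true]
    have hc : (((m - 1 - 0).toNat : Nat) : Int) = m - 1 := by omega
    rw [hc]
    rw [PySem.Int.mod_eq_emod_of_pos hn, PySem.Int.mod_eq_emod_of_pos hn,
        PySem.Int.mod_eq_emod_of_pos hn]
    rw [Int.add_emod_emod]
  · rw [PySem.List.pyRange_one_eq_nil (by omega)]
    simp only [hm, if_false, List.foldl_nil, add_zero]
    rw [PySem.Int.mod_eq_emod_of_pos hn, Int.emod_eq_of_lt h0 h1]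

-- arr[idx] = idx + 1
theorem arr_get (n idx : Int) (h0 : 0 ≤ idx) (h1 : idx < n) :
    PySem.List.pyGet? (PySem.List.pyRange 1 (n + 1) 1) idx = some (idx + 1) := by
  have hlen : (PySem.List.pyRange 1 (n + 1) 1).length = (n : Int).toNat := by
    rw [PySem.List.length_pyRange_one]; congr 1; omega
  have hlt : idx < ((PySem.List.pyRange 1 (n + 1) 1).length : Int) := by
    rw [hlen]; omega
  rw [PySem.List.pyGet?_eq_some_getElem _ h0 hlt]
  rw [PySem.List.getElem_pyRange_one]
  congr 1
  omega

-- one-step unfolding equations (rfl), to unfold exactly one loop iteration at a time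
theorem cpLoopA_succ (n m : Int) (arr : List Int) (f : Nat) (idx : Int) (path : List Int) :
    cpLoopA n m arr (f + 1) idx path
      = match PySem.List.pyGet? arr idx with
        | none => path
        | some v =>
          if cpInner n m idx = 0 then path ++ [v]
          else cpLoopA n m arr f (cpInner n m idx) (path ++ [v]) := rfl

theorem cpLoopB_succ (n s : Int) (f : Nat) (idx : Int) (out : List String) :
    cpLoopB n s (f + 1) idx out
      = if idx = 0 then out
        else cpLoopB n s f (PySem.Int.mod (idx + s) n) (out ++ [PySem.Int.toStr (idx + 1)]) := rfl

-- main loop correspondence: A's loop (one extra fuel) unfolds to B's loop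
theorem loop_corr (n m : Int) (hn : 0 < n) :
    ∀ (f : Nat) (idx : Int) (path : List Int), 0 ≤ idx → idx < n →
      (cpLoopA n m (PySem.List.pyRange 1 (n + 1) 1) (f + 1) idx path).map PySem.Int.toStr
        = cpLoopB n (cpS n m) f (PySem.Int.mod (idx + cpS n m) n)
            (path.map PySem.Int.toStr ++ [PySem.Int.toStr (idx + 1)]) := by
  intro f
  induction f with
  | zero =>
    intro idx path h0 h1
    rw [cpLoopA_succ, arr_get n idx h0 h1]
    simp only [cpLoopB]
    split_ifs <;> simp [cpLoopA]
  | succ f ih =>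
    intro idx path h0 h1
    have hb0 : 0 ≤ PySem.Int.mod (idx + cpS n m) n := PySem.Int.mod_nonneg _ hn
    have hb1 : PySem.Int.mod (idx + cpS n m) n < n := PySem.Int.mod_lt _ hn
    rw [cpLoopA_succ, arr_get n idx h0 h1]
    simp only [cpInner_eq n m idx hn h0 h1]
    rw [cpLoopB_succ]
    by_cases hz : PySem.Int.mod (idx + cpS n m) n = 0
    · simp [hz]
    · simp only [hz, if_false]
      rw [ih (PySem.Int.mod (idx + cpS n m) n) (path ++ [idx + 1]) hb0 hb1]
      simp

-- ===== VERDICT (by name: the statement is the Claim_ definition above) =====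
theorem circular_path_spec : Claim_equal_circular_path := by
  unfold Claim_equal_circular_path
  intro n m _ hpre
  unfold Pre_circular_path at hpre
  have hn : 0 < n := hpre
  have hS := cpS_bounds n m hn
  unfold Spec_circular_path
  simp only [circular_path, circular_path_alt]
  rw [show n.natAbs = n.toNat by omega]
  rw [loop_corr n m hn n.toNat 0 [] (le_refl 0) hn]
  rw [show (if m > 1 then PySem.Int.mod (m - 1) n else 0) = cpS n m from rfl]
  rw [show PySem.Int.mod (0 + cpS n m) n = cpS n m by
    rw [zero_add, PySem.Int.mod_eq_emod_of_pos hn, Int.emod_eq_of_lt hS.1 hS.2]]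
  rw [show (List.map PySem.Int.toStr ([] : List Int) ++ [PySem.Int.toStr (0 + 1)]) = ["1"] by decide]
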